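-- pv_equiv track=rewrite | github.com/gloggers99/CSC10Projects | cyclops_number.py | is_cyclops_number
-- ===== SOURCE A (Python) =====
-- def is_cyclops_number(number) -> bool:
--     number = bin(number).replace("0b", "")
--     if len(str(number)) % 2 == 0:
--         return False
--     if str(number).count('0') > 1:
--         return False
--     if str(number).count('1') % 2 != 0:
--         return False
--
--     left = True
--     left_count = 0
--     right_count = 0
--     for c in str(number):
--         if c == "1":
--             if left:
--                 left_count += 1
--             else:
--                 right_count += 1
--         if c == "0":
--             left = False
--
--     if left_count != right_count:
--         return False
--     return True
-- ===== SOURCE B (Python) =====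
-- def is_cyclops_number(number) -> bool:
--     s = bin(number).replace("0b", "")
--     return (len(s) % 2 == 1 and s.count("0") == 1
--             and s.count("1") % 2 == 0 and s[len(s) // 2] == "0")
-- ===== Notes on version B (the rewrite author's own statement) =====
-- stated objective: simpler
-- what changed: Replaced A's left/right one-counting loop and final comparison by a direct test that the single '0' sits at the middle index s[len(s)//2], keeping the parity and count guards.
import Mathlib
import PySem

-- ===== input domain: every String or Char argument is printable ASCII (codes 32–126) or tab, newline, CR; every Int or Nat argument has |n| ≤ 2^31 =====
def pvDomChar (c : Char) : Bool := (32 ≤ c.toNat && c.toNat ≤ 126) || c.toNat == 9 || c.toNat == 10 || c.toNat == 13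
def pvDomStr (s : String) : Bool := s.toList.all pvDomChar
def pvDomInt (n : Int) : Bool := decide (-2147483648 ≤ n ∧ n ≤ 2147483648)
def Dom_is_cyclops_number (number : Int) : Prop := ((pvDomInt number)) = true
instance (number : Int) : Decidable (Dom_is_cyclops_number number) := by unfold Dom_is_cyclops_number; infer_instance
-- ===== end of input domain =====

-- B replaces A's left/right one-counting loop by a direct middle-character test; objective: simpler.


-- ===== PORT A =====
-- one step of A's `for c in str(number)` loop; state = (left, left_count, right_count)
def cycStep (st : Bool × Nat × Nat) (c : Char) : Bool × Nat × Nat :=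
  let st1 := if c = '1' then
      (if st.1 then (st.1, st.2.1 + 1, st.2.2) else (st.1, st.2.1, st.2.2 + 1))
    else st
  if c = '0' then (false, st1.2.1, st1.2.2) else st1

-- body of A applied to the character list of bin(number).replace("0b", "")
def cycA (s : List Char) : Bool :=
  if s.length % 2 == 0 then false
  else if s.count '0' > 1 then false
  else if s.count '1' % 2 != 0 then false
  else
    let r := s.foldl cycStep (true, 0, 0)
    if r.2.1 != r.2.2 then false else true

def is_cyclops_number (number : Int) : Bool :=
  cycA (PySem.Chars.replace (PySem.Int.toBinChars0b number) "0b".toList "".toList)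

-- ===== PORT B =====
-- body of B applied to the character list of bin(number).replace("0b", "")
def cycB (s : List Char) : Bool :=
  (s.length % 2 == 1) && (s.count '0' == 1) && (s.count '1' % 2 == 0) &&
    (PySem.List.pyGet? s ((s.length / 2 : Nat) : Int) == some '0')

def is_cyclops_number_alt (number : Int) : Bool :=
  cycB (PySem.Chars.replace (PySem.Int.toBinChars0b number) "0b".toList "".toList)

-- ===== PRECONDITION & SPEC =====
def Spec_is_cyclops_number (number : Int) (out : Bool) : Prop := out = is_cyclops_number_alt number
instance (number : Int) (out : Bool) : Decidable (Spec_is_cyclops_number number out) := by unfold Spec_is_cyclops_number; infer_instance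

-- ===== CLAIM (what is proved, stated in full; the proofs are below) =====
def Claim_equal_is_cyclops_number : Prop := ∀ (number : Int), Dom_is_cyclops_number number → Spec_is_cyclops_number number (is_cyclops_number number)

-- ===== LEMMAS AND PROOFS =====

-- binary digit strings: every char of Nat.toDigits 2 n is '0' or '1', and it is nonempty
lemma toDigitsCore_two_all (fuel : Nat) : ∀ (n : Nat) (acc : List Char),
    (∀ c ∈ acc, c = '0' ∨ c = '1') → ∀ c ∈ Nat.toDigitsCore 2 fuel n acc, c = '0' ∨ c = '1' := by
  induction fuel with
  | zero => intro n acc hacc; simpa [Nat.toDigitsCore] using hacc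
  | succ fuel ih =>
    intro n acc hacc
    have hd : Nat.digitChar (n % 2) = '0' ∨ Nat.digitChar (n % 2) = '1' := by
      have h2 : n % 2 = 0 ∨ n % 2 = 1 := Nat.mod_two_eq_zero_or_one n
      rcases h2 with h | h <;> simp [h, Nat.digitChar]
    have hacc' : ∀ c ∈ Nat.digitChar (n % 2) :: acc, c = '0' ∨ c = '1' := by
      intro c hc
      rcases List.mem_cons.mp hc with h | h
      · subst h; exact hd
      · exact hacc c h
    simp only [Nat.toDigitsCore]
    split
    · exact hacc'
    · exact ih _ _ hacc'

lemma toDigits_two_all (n : Nat) : ∀ c ∈ Nat.toDigits 2 n, c = '0' ∨ c = '1' := by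
  have := toDigitsCore_two_all (n + 1) n [] (by simp)
  simpa [Nat.toDigits] using this

lemma toDigitsCore_ne_nil (fuel : Nat) : ∀ (n : Nat) (acc : List Char), acc ≠ [] →
    Nat.toDigitsCore 2 fuel n acc ≠ [] := by
  induction fuel with
  | zero => intro n acc h; simpa [Nat.toDigitsCore] using h
  | succ fuel ih =>
    intro n acc h
    simp only [Nat.toDigitsCore]
    split
    · simp
    · exact ih _ _ (by simp)

lemma toDigits_two_ne_nil (n : Nat) : Nat.toDigits 2 n ≠ [] := by
  simp only [Nat.toDigits, Nat.toDigitsCore]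
  split
  · simp
  · exact toDigitsCore_ne_nil n (n / 2) _ (by simp)

-- bin(number).replace("0b","") = format(number,'b'): scanning past "0b" when no 'b' occurs
lemma replace_go_no_b (fuel : Nat) : ∀ (l acc : List Char), 'b' ∉ l →
    PySem.Chars.replace.go ['0', 'b'] [] fuel l acc = acc.reverse ++ l := by
  induction fuel with
  | zero => intro l acc _; rfl
  | succ fuel ih =>
    intro l acc hb
    cases l with
    | nil => simp only [PySem.Chars.replace.go]; simp
    | cons c t =>
      have hpre : (['0', 'b'].isPrefixOf (c :: t)) = false := by
        cases t with
        | nil => simp [List.isPrefixOf]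
        | cons c2 t2 =>
          have hb2 : c2 ≠ 'b' := fun h => hb (by simp [h])
          by_cases h0 : c = '0'
          · subst h0
            simp [List.isPrefixOf]
            exact fun h => hb2 h.symm
          · simp [List.isPrefixOf]
            exact fun heq h => hb2 h.symm
      have hb' : 'b' ∉ t := fun h => hb (List.mem_cons_of_mem _ h)
      simp only [PySem.Chars.replace.go, hpre, Bool.false_eq_true, if_false]
      rw [ih t (c :: acc) hb']
      simp

lemma replace_0b (number : Int) :
    PySem.Chars.replace (PySem.Int.toBinChars0b number) "0b".toList "".toList =
      PySem.Int.toBinChars number := by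
  have hno : ∀ m : Nat, 'b' ∉ Nat.toDigits 2 m := by
    intro m h
    rcases toDigits_two_all m 'b' h with h' | h' <;> simp at h'
  by_cases hneg : number < 0
  · simp only [PySem.Int.toBinChars0b, PySem.Int.toBinChars, hneg, if_pos]
    show PySem.Chars.replace ('-' :: '0' :: 'b' :: Nat.toDigits 2 number.natAbs) ['0', 'b'] [] = _
    simp only [PySem.Chars.replace, List.isEmpty_cons]
    show PySem.Chars.replace.go ['0', 'b'] [] (Nat.toDigits 2 number.natAbs).length.succ.succ.succ
      ('-' :: '0' :: 'b' :: Nat.toDigits 2 number.natAbs) [] = _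
    simp only [PySem.Chars.replace.go, List.isPrefixOf]
    norm_num
    rw [replace_go_no_b _ _ _ (hno _)]
    rfl
  · simp only [PySem.Int.toBinChars0b, PySem.Int.toBinChars, hneg]
    show PySem.Chars.replace ('0' :: 'b' :: Nat.toDigits 2 number.toNat) ['0', 'b'] [] = _
    simp only [PySem.Chars.replace, List.isEmpty_cons]
    show PySem.Chars.replace.go ['0', 'b'] [] (Nat.toDigits 2 number.toNat).length.succ.succ
      ('0' :: 'b' :: Nat.toDigits 2 number.toNat) [] = _
    simp only [PySem.Chars.replace.go, List.isPrefixOf]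
    norm_num
    rw [replace_go_no_b _ _ _ (hno _)]
    rfl

-- A's loop from a dead-left state only counts 1s on the right
lemma foldl_cycStep_false (d : List Char) : ∀ (lc rc : Nat),
    d.foldl cycStep (false, lc, rc) = (false, lc, rc + d.count '1') := by
  induction d with
  | nil => intro lc rc; simp
  | cons c t ih =>
    intro lc rc
    by_cases h1 : c = '1'
    · simp [h1, cycStep, List.foldl_cons, ih]
      omega
    · by_cases h0 : c = '0' <;>
        simp [h1, h0, cycStep, List.foldl_cons, ih]

-- A's loop over a zero-free block only counts 1s on the left
lemma foldl_cycStep_true (d : List Char) : ∀ (lc rc : Nat), d.count '0' = 0 →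
    d.foldl cycStep (true, lc, rc) = (true, lc + d.count '1', rc) := by
  induction d with
  | nil => intro lc rc _; simp
  | cons c t ih =>
    intro lc rc h
    have h0 : c ≠ '0' := by
      intro hc; simp [hc] at h
    have ht : t.count '0' = 0 := by
      simp [h0] at h ⊢; omega
    by_cases h1 : c = '1'
    · simp [h1, cycStep, List.foldl_cons, ih _ _ ht]
      omega
    · simp [h1, h0, cycStep, List.foldl_cons, ih _ _ ht]

-- split a list with a '0' at its first '0'
lemma split_at_zero (d : List Char) (h : 0 < d.count '0') :
    ∃ a b, d = a ++ '0' :: b ∧ a.count '0' = 0 := by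
  induction d with
  | nil => simp at h
  | cons c t ih =>
    by_cases hc : c = '0'
    · exact ⟨[], t, by simp [hc], by simp⟩
    · have ht : 0 < t.count '0' := by simpa [List.count_cons, hc] using h
      rcases ih ht with ⟨a, b, hab, ha⟩
      exact ⟨c :: a, b, by simp [hab], by simp [hc, ha]⟩

-- a 0/1 list without '0' is all '1's
lemma all_one_of_no_zero (d : List Char) (hall : ∀ c ∈ d, c = '0' ∨ c = '1')
    (h : d.count '0' = 0) : d.count '1' = d.length := by
  rw [List.count_eq_length]
  intro c hc
  rcases hall c hc with h' | h'
  · rw [h'] at hc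
    have := List.count_pos_iff.mpr hc
    omega
  · exact h'.symm

-- length of a 0/1 list = #zeros + #ones
lemma length_eq_counts (d : List Char) (hall : ∀ c ∈ d, c = '0' ∨ c = '1') :
    d.length = d.count '0' + d.count '1' := by
  induction d with
  | nil => simp
  | cons c t ih =>
    have ht := ih (fun x hx => hall x (List.mem_cons_of_mem _ hx))
    rcases hall c List.mem_cons_self with h | h <;>
      simp [h, ht] <;> omega

-- main equivalence on the digit part, nonnegative case (s = d, all chars '0'/'1')
lemma cyc_pos (d : List Char) (hall : ∀ c ∈ d, c = '0' ∨ c = '1') : cycA d = cycB d := by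
  unfold cycA cycB
  by_cases hlen : d.length % 2 = 0
  · simp [hlen]
  · have hlen1 : d.length % 2 = 1 := by omega
    rcases Nat.lt_trichotomy (d.count '0') 1 with hc | hc | hc
    · -- no zero: count '1' = length is odd, A fails the parity guard, B fails count0 == 1
      have h0 : d.count '0' = 0 := by omega
      have h1 : d.count '1' = d.length := all_one_of_no_zero d hall h0
      simp [h0, h1, hlen1]
    · -- exactly one zero: A's loop compares the 1-blocks, B tests the middle character
      have hone : d.count '1' + 1 = d.length := by
        have := length_eq_counts d hall; omega
      have heven : d.count '1' % 2 = 0 := by omega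
      rcases split_at_zero d (by omega) with ⟨a, b, hab, ha0⟩
      have hb0 : b.count '0' = 0 := by
        rw [hab] at hc; simp [List.count_append, ha0] at hc ⊢; omega
      have ha1 : a.count '1' = a.length :=
        all_one_of_no_zero a (fun c hcm => hall c (by simp [hab, hcm])) ha0
      have hb1 : b.count '1' = b.length :=
        all_one_of_no_zero b (fun c hcm => hall c (by simp [hab, hcm])) hb0
      have ha1' : ∀ c ∈ a, c = '1' := fun c hcm => (List.count_eq_length.mp ha1 c hcm).symm
      have hb1' : ∀ c ∈ b, c = '1' := fun c hcm => (List.count_eq_length.mp hb1 c hcm).symm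
      -- A's loop value
      have hloop : d.foldl cycStep (true, 0, 0) = (false, a.length, b.length) := by
        rw [hab, List.foldl_append, foldl_cycStep_true a 0 0 ha0, List.foldl_cons]
        show (b.foldl cycStep (cycStep (true, 0 + a.count '1', 0) '0')) = _
        simp [cycStep, foldl_cycStep_false, ha1, hb1]
      -- B's middle character
      have hlend : d.length = a.length + b.length + 1 := by simp [hab]; omega
      have hiff : d[d.length / 2]? = some '0' ↔ a.length = b.length := by
        rw [hab]
        simp only [List.length_append, List.length_cons]
        set m := (a.length + (b.length + 1)) / 2 with hm
        constructor
        · intro hget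
          rcases Nat.lt_trichotomy m a.length with hlt | heqm | hgt
          · rw [List.getElem?_append_left hlt, List.getElem?_eq_getElem hlt] at hget
            have := ha1' _ (List.getElem_mem hlt)
            simp [this] at hget
          · omega
          · rw [List.getElem?_append_right (by omega)] at hget
            have hmk : m - a.length = (m - a.length - 1) + 1 := by omega
            rw [hmk, List.getElem?_cons_succ] at hget
            have hkb : m - a.length - 1 < b.length := by
              by_contra hkb
              rw [List.getElem?_eq_none_iff.mpr (by omega)] at hget
              simp at hget
            rw [List.getElem?_eq_getElem hkb] at hget
            have := hb1' _ (List.getElem_mem hkb)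
            simp [this] at hget
        · intro heq
          have hmeq : m = a.length := by omega
          rw [hmeq, List.getElem?_append_right (Nat.le_refl _)]
          simp
      have hbridge : PySem.List.pyGet? d ((d.length : Int) / 2) = d[d.length / 2]? := by
        rw [show ((d.length : Int) / 2) = ((d.length / 2 : Nat) : Int) by omega,
          PySem.List.pyGet?_natCast]
      by_cases heq : a.length = b.length
      · have hget := hiff.mpr heq
        simp [hc, heven, hloop, heq, hbridge, hget, hlen1]
      · have hget : ¬ d[d.length / 2]? = some '0' := fun h => heq (hiff.mp h)
        simp [hc, heven, hloop, heq, hbridge, hget, hlen1]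
    · simp [hlen1, hc, show d.count '0' ≠ 1 by omega]

-- negative case: s = '-' :: digits; A and B both reject every such string
lemma cyc_neg (d : List Char) (hall : ∀ c ∈ d, c = '0' ∨ c = '1') (hne : d ≠ []) :
    cycA ('-' :: d) = cycB ('-' :: d) := by
  unfold cycA cycB
  have hd1 : 1 ≤ d.length := List.length_pos_iff.mpr hne
  by_cases hlen : (d.length + 1) % 2 = 0
  · simp [hlen]
  · have hdl : d.length % 2 = 0 := by omega
    rcases Nat.lt_trichotomy (d.count '0') 1 with hc | hc | hc
    · -- no zero: loop keeps every 1 on the left, counts differ; B fails count0 == 1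
      have h0 : d.count '0' = 0 := by omega
      have h1 : d.count '1' = d.length := all_one_of_no_zero d hall h0
      have hloop : ('-' :: d).foldl cycStep (true, 0, 0) = (true, d.length, 0) := by
        rw [List.foldl_cons]
        show d.foldl cycStep (cycStep (true, 0, 0) '-') = _
        have : cycStep (true, 0, 0) '-' = (true, 0, 0) := by simp [cycStep]
        rw [this, foldl_cycStep_true d 0 0 h0, h1]
        norm_num
      simp [hlen, h0, h1, hdl, hloop, show d.length ≠ 0 by omega]
    · -- one zero: count '1' = length - 1 is odd, both parity tests fail
      have hone : d.count '1' + 1 = d.length := by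
        have := length_eq_counts d hall; omega
      have hodd : d.count '1' % 2 = 1 := by omega
      simp [hlen, hc, hodd]
    · simp [hc, show d.count '0' ≠ 1 by omega]

-- ===== VERDICT (by name: the statement is the Claim_ definition above) =====
theorem is_cyclops_number_spec : Claim_equal_is_cyclops_number := by
  intro number _
  unfold Spec_is_cyclops_number is_cyclops_number is_cyclops_number_alt
  rw [replace_0b]
  by_cases hneg : number < 0
  · simp only [PySem.Int.toBinChars, hneg, if_pos]
    exact cyc_neg _ (toDigits_two_all _) (toDigits_two_ne_nil _)
  · simp only [PySem.Int.toBinChars, hneg]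
    exact cyc_pos _ (toDigits_two_all _)
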